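-- pv_equiv track=rewrite | github.com/Fiorio-Organization/FHOBOTS_DSL | xml_states.py | formatar_nome_com_sublinhado_maiusculo
-- ===== SOURCE A (Python) =====
-- def formatar_nome_com_sublinhado_maiusculo(nome_str):
--     """
--     Formata uma string capitalizando a primeira letra e qualquer letra
--     que venha após um sublinhado '_', mantendo o caso original do restante.
--     Ex: "attackerCentral" -> "AttackerCentral"
--     Ex: "DFC_clearSideBall" -> "DFC_ClearSideBall"
--     """
--     if not nome_str:
--         return ""
--
--     formatted_parts = []
--
--     # Capitaliza o primeiro caractere da string se for alfabético
--     if nome_str[0].isalpha():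
--         formatted_parts.append(nome_str[0].upper())
--     else:
--         formatted_parts.append(nome_str[0])
--
--     # Itera a partir do segundo caractere para aplicar a regra do sublinhado
--     for i in range(1, len(nome_str)):
--         char = nome_str[i]
--         prev_char = nome_str[i-1]
--
--         # Se o caractere anterior for um sublinhado, capitaliza o caractere atual
--         if prev_char == '_':
--             formatted_parts.append(char.upper())
--         else:
--             formatted_parts.append(char)
--
--     return "".join(formatted_parts)
-- ===== SOURCE B (Python) =====
-- def formatar_nome_com_sublinhado_maiusculo(nome_str):
--     return '_'.join(t[:1].upper() + t[1:] for t in nome_str.split('_'))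
-- ===== Notes on version B (the rewrite author's own statement) =====
-- stated objective: idiomatic
-- what changed: Replaces the prev-char state-machine index scan with a one-line split on underscores, uppercase of each token's first character, and rejoin.
import Mathlib
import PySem

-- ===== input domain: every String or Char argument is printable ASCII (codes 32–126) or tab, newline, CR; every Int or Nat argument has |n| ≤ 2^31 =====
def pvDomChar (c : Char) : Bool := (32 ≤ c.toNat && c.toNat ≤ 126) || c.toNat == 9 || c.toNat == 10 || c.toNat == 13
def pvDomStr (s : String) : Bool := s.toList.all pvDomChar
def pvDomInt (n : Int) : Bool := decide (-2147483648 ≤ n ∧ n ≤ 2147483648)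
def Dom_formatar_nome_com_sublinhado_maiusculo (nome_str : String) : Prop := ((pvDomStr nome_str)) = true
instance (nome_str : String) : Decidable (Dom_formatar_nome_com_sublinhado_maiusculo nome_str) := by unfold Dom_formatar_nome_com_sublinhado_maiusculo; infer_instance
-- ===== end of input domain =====

-- B replaces A's prev-char state-machine index scan with an idiomatic split on '_',
-- uppercase of each token's first character, and rejoin (same cost, plainer code).

-- ===== PORT A =====
-- the 'for i in range(1, len(nome_str))' loop: char = s[i], prev_char = s[i-1],
-- rendered as structural recursion carrying the previous character
def pvLoopA (prev : Char) : List Char → List Char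
  | [] => []
  | ch :: rest => (if prev = '_' then PySem.Chars.upperChar ch else ch) :: pvLoopA ch rest

def formatar_nome_com_sublinhado_maiusculo (nome_str : String) : String :=
  match nome_str.toList with
  | [] => ""   -- if not nome_str: return ""
  | c :: rest =>
      -- first char: upper() if alphabetic, else unchanged; then the loop from index 1
      String.ofList ((if PySem.Chars.isalpha c then PySem.Chars.upperChar c else c) :: pvLoopA c rest)

-- ===== PORT B =====
-- t[:1].upper() + t[1:]
def pvCapTok (t : List Char) : List Char :=
  PySem.Chars.upper (PySem.List.slice t none (some 1)) ++ PySem.List.slice t (some 1) none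

-- '_'.join(t[:1].upper() + t[1:] for t in nome_str.split('_'))
def formatar_nome_com_sublinhado_maiusculo_alt (nome_str : String) : String :=
  String.ofList (PySem.Chars.join ['_'] ((PySem.Chars.splitOn nome_str.toList ['_']).map pvCapTok))

-- ===== PRECONDITION & SPEC =====
def Spec_formatar_nome_com_sublinhado_maiusculo (nome_str : String) (out : String) : Prop := out = formatar_nome_com_sublinhado_maiusculo_alt nome_str
instance (nome_str : String) (out : String) : Decidable (Spec_formatar_nome_com_sublinhado_maiusculo nome_str out) := by unfold Spec_formatar_nome_com_sublinhado_maiusculo; infer_instance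

-- ===== CLAIM (what is proved, stated in full; the proofs are below) =====
def Claim_equal_formatar_nome_com_sublinhado_maiusculo : Prop := ∀ (nome_str : String), Dom_formatar_nome_com_sublinhado_maiusculo nome_str → Spec_formatar_nome_com_sublinhado_maiusculo nome_str (formatar_nome_com_sublinhado_maiusculo nome_str)

-- ===== LEMMAS AND PROOFS =====

-- structural description of splitOn · ['_'] (proof-side only)
def splitU : List Char → List (List Char)
  | [] => [[]]
  | c :: rest =>
      match splitU rest with
      | [] => []     -- unreachable
      | t :: ts => if c = '_' then [] :: t :: ts else (c :: t) :: ts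

theorem splitU_ne_nil (cs : List Char) : splitU cs ≠ [] := by
  cases cs with
  | nil => simp [splitU]
  | cons c rest =>
    cases h : splitU rest with
    | nil => exact absurd h (splitU_ne_nil rest)
    | cons t ts => simp [splitU, h]; split <;> simp

theorem go_spec (fuel : Nat) (l cur : List Char) (acc : List (List Char))
    (h : l.length < fuel) :
    PySem.Chars.splitOn.go ['_'] fuel l cur acc
      = acc.reverse ++ (splitU l).modifyHead (cur.reverse ++ ·) := by
  induction fuel generalizing l cur acc with
  | zero => omega
  | succ fuel ih =>
    cases l with
    | nil => simp [PySem.Chars.splitOn.go, splitU]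
    | cons c rest =>
      rw [PySem.Chars.splitOn.go]
      by_cases hc : c = '_'
      · subst hc
        have hp : List.isPrefixOf ['_'] ('_' :: rest) = true := by
          simp [List.isPrefixOf]
        simp only [hp, if_pos]
        rw [ih _ _ _ (by simpa using Nat.lt_of_succ_lt_succ h)]
        cases ht : splitU rest with
        | nil => exact absurd ht (splitU_ne_nil rest)
        | cons t ts => simp [splitU, ht]
      · have hp : List.isPrefixOf ['_'] (c :: rest) = false := by
          simp [List.isPrefixOf]
          exact fun h => hc h.symm
        simp only [hp, Bool.false_eq_true, if_neg, not_false_iff]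
        rw [ih _ _ _ (by simpa using Nat.lt_of_succ_lt_succ h)]
        cases ht : splitU rest with
        | nil => exact absurd ht (splitU_ne_nil rest)
        | cons t ts => simp [splitU, ht, hc]

theorem splitOn_eq_splitU (cs : List Char) :
    PySem.Chars.splitOn cs ['_'] = splitU cs := by
  rw [PySem.Chars.splitOn, go_spec _ _ _ _ (by omega)]
  cases h : splitU cs with
  | nil => exact absurd h (splitU_ne_nil cs)
  | cons t ts => simp

theorem capTok_nil : pvCapTok [] = [] := by
  simp [pvCapTok, pysem, PySem.Chars.upper]

theorem capTok_cons (c : Char) (t : List Char) :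
    pvCapTok (c :: t) = PySem.Chars.upperChar c :: t := by
  simp [pvCapTok, pysem, PySem.Chars.upper]

theorem upperChar_of_not_alpha (c : Char) (h : PySem.Chars.isalpha c = false) :
    PySem.Chars.upperChar c = c := by
  have : PySem.Chars.islower c = false := by
    simp [PySem.Chars.isalpha] at h; exact h.2
  simp [PySem.Chars.upperChar, this]

theorem if_alpha_upper (c : Char) :
    (if PySem.Chars.isalpha c then PySem.Chars.upperChar c else c) = PySem.Chars.upperChar c := by
  by_cases h : PySem.Chars.isalpha c = true
  · simp [h]
  · simp [eq_false_of_ne_true h, upperChar_of_not_alpha c (eq_false_of_ne_true h)]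

-- full A-output on a nonempty char list (first char uppercased), and the variant
-- where the first char is left as is (what the loop does after a non-underscore)
def fA : List Char → List Char
  | [] => []
  | c :: rest => PySem.Chars.upperChar c :: pvLoopA c rest

def tA : List Char → List Char
  | [] => []
  | c :: rest => c :: pvLoopA c rest

theorem loopA_eq (c : Char) (cs : List Char) :
    pvLoopA c cs = if c = '_' then fA cs else tA cs := by
  cases cs with
  | nil => simp [pvLoopA, fA, tA]
  | cons x xs => by_cases h : c = '_' <;> simp [pvLoopA, fA, tA, h]

theorem main_lemma (cs : List Char) :
    fA cs = PySem.Chars.join ['_'] ((splitU cs).map pvCapTok) ∧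
    tA cs = PySem.Chars.join ['_']
      (match splitU cs with | [] => [] | t :: ts => t :: ts.map pvCapTok) := by
  induction cs with
  | nil => simp [fA, tA, splitU, capTok_nil, PySem.Chars.join_singleton]
  | cons c rest ih =>
    obtain ⟨ihf, iht⟩ := ih
    cases ht : splitU rest with
    | nil => exact absurd ht (splitU_ne_nil rest)
    | cons t0 ts =>
      rw [ht] at ihf iht
      by_cases hc : c = '_'
      · subst hc
        constructor
        · show PySem.Chars.upperChar '_' :: pvLoopA '_' rest = _
          rw [loopA_eq, if_pos rfl, ihf]
          simp [splitU, ht, capTok_nil, PySem.Chars.join_cons_cons, PySem.Chars.upperChar,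
                PySem.Chars.islower]
        · show '_' :: pvLoopA '_' rest = _
          rw [loopA_eq, if_pos rfl, ihf]
          simp [splitU, ht, PySem.Chars.join_cons_cons]
      · constructor
        · show PySem.Chars.upperChar c :: pvLoopA c rest = _
          rw [loopA_eq, if_neg hc, iht]
          cases ts with
          | nil => simp [splitU, ht, hc, capTok_cons, PySem.Chars.join_singleton]
          | cons q qs =>
            simp [splitU, ht, hc, capTok_cons, PySem.Chars.join_cons_cons]
        · show c :: pvLoopA c rest = _
          rw [loopA_eq, if_neg hc, iht]
          cases ts with
          | nil => simp [splitU, ht, hc, PySem.Chars.join_singleton]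
          | cons q qs =>
            simp [splitU, ht, hc, PySem.Chars.join_cons_cons]

-- ===== VERDICT (by name: the statement is the Claim_ definition above) =====
theorem formatar_nome_com_sublinhado_maiusculo_spec : Claim_equal_formatar_nome_com_sublinhado_maiusculo := by
  intro s _
  unfold Spec_formatar_nome_com_sublinhado_maiusculo
  unfold formatar_nome_com_sublinhado_maiusculo formatar_nome_com_sublinhado_maiusculo_alt
  rw [splitOn_eq_splitU]
  cases h : s.toList with
  | nil => simp [splitU, capTok_nil, PySem.Chars.join_singleton]
  | cons c rest =>
    show String.ofList ((if PySem.Chars.isalpha c then PySem.Chars.upperChar c else c) :: pvLoopA c rest) = _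
    rw [if_alpha_upper]
    have := (main_lemma (c :: rest)).1
    rw [show PySem.Chars.upperChar c :: pvLoopA c rest = fA (c :: rest) from rfl, this]
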